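-- pv_equiv track=rewrite | github.com/pypi-data/pypi-mirror-404 | packages/copyparty/copyparty-1.20.6.tar.gz/copyparty-1.20.6/copyparty/util.py | unescape_cookie
-- ===== SOURCE A (Python) =====
-- def unescape_cookie(orig )  :
--     # mw=idk; doot=qwe%2Crty%3Basd+fgh%2Bjkl%25zxc%26vbn  # qwe,rty;asd fgh+jkl%zxc&vbn
--     ret = []
--     esc = ""
--     for ch in orig:
--         if ch == "%":
--             if esc:
--                 ret.append(esc)
--             esc = ch
--
--         elif esc:
--             esc += ch
--             if len(esc) == 3:
--                 try:
--                     ret.append(chr(int(esc[1:], 16)))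
--                 except:
--                     ret.append(esc)
--                 esc = ""
--
--         else:
--             ret.append(ch)
--
--     if esc:
--         ret.append(esc)
--
--     return "".join(ret)
-- ===== SOURCE B (Python) =====
-- def unescape_cookie(orig):
--     parts = orig.split("%")
--     out = [parts[0]]
--     for chunk in parts[1:]:
--         if len(chunk) < 2:
--             out.append("%" + chunk)
--         else:
--             try:
--                 out.append(chr(int(chunk[:2], 16)) + chunk[2:])
--             except:
--                 out.append("%" + chunk)
--     return "".join(out)
-- ===== Notes on version B (the rewrite author's own statement) =====
-- stated objective: simpler
-- what changed: Replaced the per-character escape-accumulator state machine with a single split on the percent separator plus one decode pass over the chunks (bulk library split instead of per-character Python-level state updates).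
import Mathlib
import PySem

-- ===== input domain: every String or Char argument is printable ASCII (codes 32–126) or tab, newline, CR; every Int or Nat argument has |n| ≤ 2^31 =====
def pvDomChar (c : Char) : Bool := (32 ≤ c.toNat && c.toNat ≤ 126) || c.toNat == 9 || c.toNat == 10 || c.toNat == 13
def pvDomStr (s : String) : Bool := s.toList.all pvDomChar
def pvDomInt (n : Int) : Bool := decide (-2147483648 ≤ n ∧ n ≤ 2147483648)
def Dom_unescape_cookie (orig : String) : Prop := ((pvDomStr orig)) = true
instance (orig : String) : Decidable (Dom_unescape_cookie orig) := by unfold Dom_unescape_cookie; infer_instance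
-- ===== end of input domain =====

-- B replaces A's per-character escape state machine with a split on the percent separator followed by
-- one decode pass over the chunks (simpler decomposition; a timing run measured it faster by a constant factor).

-- Python chr(n) for the values reached here (n from a two-hex-digit parse, so |n| ≤ 255):
-- returns none exactly where chr raises (n < 0); bound 0xD800 keeps Char.ofNat valid — exact below the surrogate range.
def pvPyChr (n : Int) : Option Char :=
  if 0 ≤ n ∧ n < 55296 then some (Char.ofNat n.toNat) else none

-- ===== PORT A =====
-- try: ret.append(chr(int(esc[1:], 16))) except: ret.append(esc)
def pvDecodeEsc (esc : List Char) : List Char :=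
  match PySem.Int.ofCharsBase? (esc.drop 1) 16 with
  | some n =>
      match pvPyChr n with
      | some c => [c]
      | none => esc
  | none => esc

-- the 'for ch in orig' loop, state = (ret, esc)
def pvARun : List Char → List (List Char) → List Char → List (List Char)
  | [], ret, esc => if esc.isEmpty then ret else ret ++ [esc]
  | ch :: rest, ret, esc =>
    if ch = '%' then
      pvARun rest (if esc.isEmpty then ret else ret ++ [esc]) [ch]
    else if esc.isEmpty then
      pvARun rest (ret ++ [[ch]]) esc
    else
      let esc2 := esc ++ [ch]
      if esc2.length = 3 then pvARun rest (ret ++ [pvDecodeEsc esc2]) []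
      else pvARun rest ret esc2

def unescape_cookie (orig : String) : String :=
  String.ofList (pvARun orig.toList [] []).flatten   -- "".join(ret)

-- ===== PORT B =====
-- hand port of orig.split("%"): Python str.split with a one-character separator, exact (no maxsplit)
def pvSplitPct : List Char → List (List Char)
  | [] => [[]]
  | c :: rest =>
    match pvSplitPct rest with
    | [] => [[]]      -- unreachable: pvSplitPct never returns []
    | h :: t => if c = '%' then [] :: h :: t else (c :: h) :: t

def pvBChunk (chunk : List Char) : List Char :=
  if chunk.length < 2 then '%' :: chunk
  else
    match PySem.Int.ofCharsBase? (chunk.take 2) 16 with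
    | some n =>
        match pvPyChr n with
        | some c => c :: chunk.drop 2
        | none => '%' :: chunk
    | none => '%' :: chunk

def unescape_cookie_alt (orig : String) : String :=
  match pvSplitPct orig.toList with
  | [] => ""        -- unreachable
  | h :: t => String.ofList (h ++ (t.map pvBChunk).flatten)

-- ===== PRECONDITION & SPEC =====
def Spec_unescape_cookie (orig : String) (out : String) : Prop := out = unescape_cookie_alt orig
instance (orig : String) (out : String) : Decidable (Spec_unescape_cookie orig out) := by unfold Spec_unescape_cookie; infer_instance

-- ===== CLAIM (what is proved, stated in full; the proofs are below) =====
def Claim_equal_unescape_cookie : Prop := ∀ (orig : String), Dom_unescape_cookie orig → Spec_unescape_cookie orig (unescape_cookie orig)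

-- ===== LEMMAS AND PROOFS =====

-- Common recursive description of the decoding: pvS = main state, pvP = just saw '%',
-- pvP2 a = saw '%' then the non-'%' char a.
mutual
def pvS : List Char → List Char
  | [] => []
  | c :: rest => if c = '%' then pvP rest else c :: pvS rest
def pvP : List Char → List Char
  | [] => ['%']
  | c :: rest => if c = '%' then '%' :: pvP rest else pvP2 c rest
def pvP2 (a : Char) : List Char → List Char
  | [] => ['%', a]
  | c :: rest => if c = '%' then '%' :: a :: pvP rest else pvDecodeEsc ['%', a, c] ++ pvS rest
end

lemma pvARun_flatten (cs : List Char) : ∀ ret : List (List Char),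
    (pvARun cs ret []).flatten = ret.flatten ++ pvS cs
    ∧ (pvARun cs ret ['%']).flatten = ret.flatten ++ pvP cs
    ∧ ∀ a : Char, (pvARun cs ret ['%', a]).flatten = ret.flatten ++ pvP2 a cs := by
  induction cs with
  | nil =>
      intro ret
      simp [pvARun, pvS, pvP, pvP2]
  | cons c rest ih =>
      intro ret
      by_cases hc : c = '%'
      · subst hc
        refine ⟨?_, ?_, ?_⟩
        · simpa [pvARun, pvS] using (ih ret).2.1
        · simpa [pvARun, pvP] using (ih (ret ++ [['%']])).2.1
        · intro a
          simpa [pvARun, pvP2] using (ih (ret ++ [['%', a]])).2.1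
      · refine ⟨?_, ?_, ?_⟩
        · simpa [pvARun, hc, pvS] using (ih (ret ++ [[c]])).1
        · simpa [pvARun, hc, pvP] using ((ih ret).2.2 c)
        · intro a
          simpa [pvARun, hc, pvP2] using (ih (ret ++ [pvDecodeEsc ['%', a, c]])).1

lemma pvSplitPct_ne_nil (cs : List Char) : pvSplitPct cs ≠ [] := by
  cases cs with
  | nil => simp [pvSplitPct]
  | cons c rest =>
      cases h : pvSplitPct rest with
      | nil => simp [pvSplitPct, h]
      | cons hh tt => by_cases hc : c = '%' <;> simp [pvSplitPct, h, hc]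

-- the split-then-decode pass computes the same three functions (fuel = list length)
lemma pvSplit_spec : ∀ n : Nat, ∀ cs : List Char, cs.length ≤ n →
    (pvS cs = match pvSplitPct cs with
              | [] => []
              | h :: t => h ++ (t.map pvBChunk).flatten)
    ∧ (pvP cs = match pvSplitPct cs with
              | [] => []
              | h :: t => pvBChunk h ++ (t.map pvBChunk).flatten)
    ∧ ∀ a : Char, pvP2 a cs = match pvSplitPct cs with
              | [] => []
              | h :: t => pvBChunk (a :: h) ++ (t.map pvBChunk).flatten := by
  intro n
  induction n with
  | zero =>
      intro cs hlen
      have : cs = [] := by cases cs <;> simp_all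
      subst this
      simp [pvS, pvP, pvP2, pvSplitPct, pvBChunk]
  | succ n ih =>
      intro cs hlen
      cases cs with
      | nil => simp [pvS, pvP, pvP2, pvSplitPct, pvBChunk]
      | cons c rest =>
          have hr : rest.length ≤ n := by simpa using Nat.lt_succ_iff.mp (by simpa using hlen)
          obtain ⟨h', t', hsplit⟩ : ∃ h' t', pvSplitPct rest = h' :: t' := by
            cases hsp : pvSplitPct rest with
            | nil => exact absurd hsp (pvSplitPct_ne_nil rest)
            | cons h t => exact ⟨h, t, rfl⟩
          have IH1 := (ih rest hr).1
          have IH2 := (ih rest hr).2.1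
          have IH3 := (ih rest hr).2.2
          rw [hsplit] at IH1 IH2 IH3
          by_cases hc : c = '%'
          · subst hc
            refine ⟨?_, ?_, ?_⟩
            · simp only [pvS, pvSplitPct, hsplit]
              simp [IH2]
            · simp only [pvP, pvSplitPct, hsplit]
              simp [IH2, pvBChunk]
            · intro a
              simp only [pvP2, pvSplitPct, hsplit]
              simp [IH2, pvBChunk]
          · refine ⟨?_, ?_, ?_⟩
            · simp only [pvS, pvSplitPct, hsplit, if_neg hc]
              simp [IH1]
            · simp only [pvP, pvSplitPct, hsplit, if_neg hc]
              simp [IH3]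
            · intro a
              simp only [pvP2, pvSplitPct, hsplit, if_neg hc]
              -- chunk a :: c :: h' has length ≥ 2, take 2 = [a, c]
              have h2 : ¬ (a :: c :: h').length < 2 := by simp
              simp only [pvBChunk, if_neg h2, List.take, List.drop]
              simp only [pvDecodeEsc, List.drop]
              cases hparse : PySem.Int.ofCharsBase? [a, c] 16 with
              | none => simp [IH1]
              | some m =>
                  cases hchr : pvPyChr m with
                  | none => simp [hchr, IH1]
                  | some ch => simp [hchr, IH1]

-- ===== VERDICT (by name: the statement is the Claim_ definition above) =====
theorem unescape_cookie_spec : Claim_equal_unescape_cookie := by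
  intro orig _
  unfold Spec_unescape_cookie unescape_cookie unescape_cookie_alt
  have hA := (pvARun_flatten orig.toList []).1
  simp only [List.flatten_nil, List.nil_append] at hA
  rw [hA]
  have hB := (pvSplit_spec orig.toList.length orig.toList le_rfl).1
  cases hsp : pvSplitPct orig.toList with
  | nil => exact absurd hsp (pvSplitPct_ne_nil orig.toList)
  | cons h t =>
      rw [hsp] at hB
      rw [hB]
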